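-- pv_equiv track=rewrite | github.com/Apreche/advent-of-code | 2020/12/rain_risk.py | follow_directions
-- ===== SOURCE A (Python) =====
-- START_POSITION = (0, 0)
--
-- START_FACING = 'E'
--
-- DIRECTIONS = {
--     'N': (0, 1),
--     'E': (1, 0),
--     'S': (0, -1),
--     'W': (-1, 0),
-- }
--
-- ROTATIONS = {
--     'L': {
--         'N': {90: 'W', 180: 'S', 270: 'E'},
--         'E': {90: 'N', 180: 'W', 270: 'S'},
--         'S': {90: 'E', 180: 'N', 270: 'W'},
--         'W': {90: 'S', 180: 'E', 270: 'N'},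
--     },
--     'R': {
--         'N': {90: 'E', 180: 'S', 270: 'W'},
--         'E': {90: 'S', 180: 'W', 270: 'N'},
--         'S': {90: 'W', 180: 'N', 270: 'E'},
--         'W': {90: 'N', 180: 'E', 270: 'S'},
--     },
-- }
--
-- def move(current_location, direction, distance):
--     x_vec, y_vec = DIRECTIONS[direction]
--     x_move = x_vec * distance
--     y_move = y_vec * distance
--     vector = (x_move, y_move)
--     return tuple(
--         map(
--             sum,
--             zip(current_location, vector)
--         )
--     )
--
-- def follow_directions(instructions):
--
--     current_position = START_POSITION
--     current_facing = START_FACING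
--
--     for instruction, distance in instructions:
--         if instruction in DIRECTIONS:
--             current_position = move(
--                 current_position,
--                 instruction,
--                 distance
--             )
--         elif instruction in ROTATIONS:
--             current_facing = ROTATIONS[instruction][current_facing][distance]
--         else:  # Must be F
--             current_position = move(
--                 current_position,
--                 current_facing,
--                 distance
--             )
--     return current_position
-- ===== SOURCE B (Python) =====
-- DIR = {'N': (0, 1), 'E': (1, 0), 'S': (0, -1), 'W': (-1, 0)}
-- TURNS = {90: 1, 180: 2, 270: 3}
--
-- def follow_directions(instructions):
--     px, py = 0, 0
--     fx, fy = 1, 0  # facing East as a unit vector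
--     for ins, d in instructions:
--         if ins in DIR:
--             dx, dy = DIR[ins]
--             px += dx * d
--             py += dy * d
--         elif ins in ('L', 'R'):
--             for _ in range(TURNS[d]):
--                 fx, fy = (-fy, fx) if ins == 'L' else (fy, -fx)
--         else:  # forward
--             px += fx * d
--             py += fy * d
--     return (px, py)
-- ===== Notes on version B (the rewrite author's own statement) =====
-- stated objective: idiomatic
-- what changed: B replaces the letter-valued facing state and the 24-entry nested ROTATIONS lookup table by an integer facing vector rotated in place with the 90-degree coordinate maps (x,y)->(-y,x)/(y,-x), applied 1-3 times per turn instruction.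
import Mathlib
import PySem

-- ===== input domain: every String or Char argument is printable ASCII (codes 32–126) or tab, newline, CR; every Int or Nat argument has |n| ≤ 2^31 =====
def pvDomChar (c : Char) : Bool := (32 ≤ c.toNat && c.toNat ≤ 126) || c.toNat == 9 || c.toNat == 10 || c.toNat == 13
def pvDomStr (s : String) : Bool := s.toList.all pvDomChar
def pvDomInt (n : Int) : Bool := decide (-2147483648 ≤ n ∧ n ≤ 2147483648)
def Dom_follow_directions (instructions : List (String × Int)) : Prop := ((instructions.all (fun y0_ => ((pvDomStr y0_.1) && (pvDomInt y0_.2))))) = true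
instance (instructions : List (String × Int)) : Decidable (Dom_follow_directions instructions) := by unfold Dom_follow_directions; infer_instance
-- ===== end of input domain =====

-- B keeps the facing as an integer unit vector rotated by 90-degree coordinate maps instead of
-- A's facing letter and 24-entry nested ROTATIONS table (objective: idiomatic; same O(n) cost).
-- Pre_ excludes the inputs where A raises KeyError (an 'L'/'R' instruction whose distance is not 90/180/270).

-- ===== PORT A =====
def pvDIRECTIONS : PySem.Dict String (Int × Int) :=
  PySem.Dict.mk [("N", (0, 1)), ("E", (1, 0)), ("S", (0, -1)), ("W", (-1, 0))]

def pvROTATIONS : PySem.Dict String (PySem.Dict String (PySem.Dict Int String)) :=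
  PySem.Dict.mk
    [ ("L", PySem.Dict.mk
        [ ("N", PySem.Dict.mk [(90, "W"), (180, "S"), (270, "E")])
        , ("E", PySem.Dict.mk [(90, "N"), (180, "W"), (270, "S")])
        , ("S", PySem.Dict.mk [(90, "E"), (180, "N"), (270, "W")])
        , ("W", PySem.Dict.mk [(90, "S"), (180, "E"), (270, "N")]) ])
    , ("R", PySem.Dict.mk
        [ ("N", PySem.Dict.mk [(90, "E"), (180, "S"), (270, "W")])
        , ("E", PySem.Dict.mk [(90, "S"), (180, "W"), (270, "N")])
        , ("S", PySem.Dict.mk [(90, "W"), (180, "N"), (270, "E")])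
        , ("W", PySem.Dict.mk [(90, "N"), (180, "E"), (270, "S")]) ]) ]

-- move(current_location, direction, distance); the dict lookup always hits inside Pre_
-- (the default is never the result there), and the zip/map(sum) is the componentwise sum.
def pvMove (cur : Int × Int) (direction : String) (distance : Int) : Int × Int :=
  let vec := PySem.Dict.getD pvDIRECTIONS direction (0, 0)
  let x_move := vec.1 * distance
  let y_move := vec.2 * distance
  (cur.1 + x_move, cur.2 + y_move)

-- the for-loop of A as structural recursion over the instruction list, state = (position, facing letter);
-- the two nested dict lookups use getD with a junk default, hit inside Pre_
def pvLoopA : Int × Int → String → List (String × Int) → Int × Int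
  | pos, _, [] => pos
  | pos, facing, (ins, d) :: rest =>
      if pvDIRECTIONS.contains ins then
        pvLoopA (pvMove pos ins d) facing rest
      else if pvROTATIONS.contains ins then
        pvLoopA pos (PySem.Dict.getD (PySem.Dict.getD (PySem.Dict.getD pvROTATIONS ins (PySem.Dict.mk [])) facing (PySem.Dict.mk [])) d "E") rest
      else
        pvLoopA (pvMove pos facing d) facing rest

def follow_directions (instructions : List (String × Int)) : Int × Int :=
  pvLoopA (0, 0) "E" instructions

-- ===== PORT B =====
def pvDIR : PySem.Dict String (Int × Int) :=
  PySem.Dict.mk [("N", (0, 1)), ("E", (1, 0)), ("S", (0, -1)), ("W", (-1, 0))]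

def pvTURNS : PySem.Dict Int Nat := PySem.Dict.mk [(90, 1), (180, 2), (270, 3)]

-- 'fx, fy = (-fy, fx) if ins == "L" else (fy, -fx)' applied k times (the inner for-loop)
def pvRotIter (ins : String) : Nat → Int × Int → Int × Int
  | 0, f => f
  | k + 1, f => pvRotIter ins k (if ins = "L" then (-f.2, f.1) else (f.2, -f.1))

def pvLoopB : Int × Int → Int × Int → List (String × Int) → Int × Int
  | p, _, [] => p
  | p, f, (ins, d) :: rest =>
      if pvDIR.contains ins then
        let v := PySem.Dict.getD pvDIR ins (0, 0)
        pvLoopB (p.1 + v.1 * d, p.2 + v.2 * d) f rest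
      else if ins = "L" ∨ ins = "R" then
        pvLoopB p (pvRotIter ins (PySem.Dict.getD pvTURNS d 0) f) rest
      else
        pvLoopB (p.1 + f.1 * d, p.2 + f.2 * d) f rest

def follow_directions_alt (instructions : List (String × Int)) : Int × Int :=
  pvLoopB (0, 0) (1, 0) instructions

-- ===== PRECONDITION & SPEC =====
-- Pre_ excludes exactly the inputs on which A raises KeyError: a pair whose instruction is
-- 'L' or 'R' with a distance outside {90, 180, 270} (B raises the same KeyError there).
def Pre_follow_directions (instructions : List (String × Int)) : Prop :=
  ∀ p ∈ instructions, (p.1 = "L" ∨ p.1 = "R") → p.2 = 90 ∨ p.2 = 180 ∨ p.2 = 270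
instance (instructions : List (String × Int)) : Decidable (Pre_follow_directions instructions) := by unfold Pre_follow_directions; infer_instance

def pvWitness_follow_directions : (List (String × Int)) :=
  [("F", 10), ("N", 3), ("L", 90), ("F", 7), ("R", 180), ("F", 2)]

def Spec_follow_directions (instructions : List (String × Int)) (out : Int × Int) : Prop := out = follow_directions_alt instructions
instance (instructions : List (String × Int)) (out : Int × Int) : Decidable (Spec_follow_directions instructions out) := by unfold Spec_follow_directions; infer_instance

-- ===== CLAIM (what is proved, stated in full; the proofs are below) =====
def Claim_equal_follow_directions : Prop := ∀ (instructions : List (String × Int)), Dom_follow_directions instructions → Pre_follow_directions instructions → Spec_follow_directions instructions (follow_directions instructions)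

-- ===== LEMMAS AND PROOFS =====

lemma pvROT_not_contains (s : String) (h1 : s ≠ "L") (h2 : s ≠ "R") :
    pvROTATIONS.contains s = false := by
  have e1 : ("L" == s) = false := by simp; exact fun e => h1 e.symm
  have e2 : ("R" == s) = false := by simp; exact fun e => h2 e.symm
  simp [pvROTATIONS, PySem.Dict.contains_mk, e1, e2]

-- the letter facing and the vector facing stay in sync: look up the letter in DIRECTIONS
def pvVecOf (facing : String) : Int × Int := PySem.Dict.getD pvDIRECTIONS facing (0, 0)

-- the letter lookups and the vector rotations stay in sync, case by case (24 closed cases)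
lemma pvRot_sync (ins f : String) (d : Int)
    (hins : ins = "L" ∨ ins = "R") (hf : f = "N" ∨ f = "E" ∨ f = "S" ∨ f = "W")
    (hd : d = 90 ∨ d = 180 ∨ d = 270) :
    pvRotIter ins (PySem.Dict.getD pvTURNS d 0) (pvVecOf f)
      = pvVecOf (PySem.Dict.getD (PySem.Dict.getD (PySem.Dict.getD pvROTATIONS ins (PySem.Dict.mk [])) f (PySem.Dict.mk [])) d "E")
    ∧ (PySem.Dict.getD (PySem.Dict.getD (PySem.Dict.getD pvROTATIONS ins (PySem.Dict.mk [])) f (PySem.Dict.mk [])) d "E" = "N"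
       ∨ PySem.Dict.getD (PySem.Dict.getD (PySem.Dict.getD pvROTATIONS ins (PySem.Dict.mk [])) f (PySem.Dict.mk [])) d "E" = "E"
       ∨ PySem.Dict.getD (PySem.Dict.getD (PySem.Dict.getD pvROTATIONS ins (PySem.Dict.mk [])) f (PySem.Dict.mk [])) d "E" = "S"
       ∨ PySem.Dict.getD (PySem.Dict.getD (PySem.Dict.getD pvROTATIONS ins (PySem.Dict.mk [])) f (PySem.Dict.mk [])) d "E" = "W") := by
  rcases hins with h | h <;> subst h <;>
    rcases hf with h | h | h | h <;> subst h <;>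
      rcases hd with h | h | h <;> subst h <;> exact (by decide)

-- main invariant: with a valid facing letter, the two loops agree
lemma pvLoop_eq (rest : List (String × Int)) :
    ∀ (pos : Int × Int) (f : String), (f = "N" ∨ f = "E" ∨ f = "S" ∨ f = "W") →
    Pre_follow_directions rest →
    pvLoopA pos f rest = pvLoopB pos (pvVecOf f) rest := by
  induction rest with
  | nil => intro pos f _ _; simp [pvLoopA, pvLoopB]
  | cons hd tl ih =>
    rintro pos f hf hpre
    obtain ⟨ins, d⟩ := hd
    have hpre' : Pre_follow_directions tl := fun p hp => hpre p (List.mem_cons_of_mem _ hp)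
    by_cases c1 : pvDIRECTIONS.contains ins = true
    · have c1B : pvDIR.contains ins = true := c1
      simp only [pvLoopA, pvLoopB, c1, c1B, if_true]
      exact ih _ f hf hpre'
    · have c1f : pvDIRECTIONS.contains ins = false := by simpa using c1
      have c1Bf : pvDIR.contains ins = false := c1f
      by_cases hLR : ins = "L" ∨ ins = "R"
      · have hd90 : d = 90 ∨ d = 180 ∨ d = 270 := hpre (ins, d) (List.mem_cons_self) hLR
        have c2 : pvROTATIONS.contains ins = true := by
          rcases hLR with h | h <;> subst h <;> decide
        simp only [pvLoopA, pvLoopB, c1f, c1Bf, c2, if_true, Bool.false_eq_true, if_false, if_pos hLR]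
        rw [(pvRot_sync ins f d hLR hf hd90).1]
        exact ih pos _ (pvRot_sync ins f d hLR hf hd90).2 hpre'
      · have c2f : pvROTATIONS.contains ins = false :=
          pvROT_not_contains ins (fun h => hLR (Or.inl h)) (fun h => hLR (Or.inr h))
        simp only [pvLoopA, pvLoopB, c1f, c1Bf, c2f, Bool.false_eq_true, if_false, if_neg hLR]
        exact ih _ f hf hpre'
-- ===== VERDICT (by name: the statement is the Claim_ definition above) =====
theorem follow_directions_spec : Claim_equal_follow_directions := by
  intro instructions _ hpre
  unfold Spec_follow_directions follow_directions follow_directions_alt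
  have h := pvLoop_eq instructions (0, 0) "E" (by simp) hpre
  rw [h]; rfl
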